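-- pv_equiv track=rewrite | github.com/wxwilcke/hypodisc | hypodisc/multimodal/langutil.py | _collapse_charsets
-- ===== SOURCE A (Python) =====
-- def _inrange(charset:str, char:str, complement:bool = False) -> bool:
--     """ Return true if character is part of a character set, or false if
--         the complement is asked.
--
--     :param charset:
--     :type charset: str
--     :param char:
--     :type char: str
--     :param complement:
--     :type complement: bool
--     :rtype: bool
--
--     """
--     isin = False
--     if charset[0] == '[' and charset[-1] == ']':
--         charset = charset[1:-1]
--
--     # range [x-y]
--     if '-' in charset:
--         assert len(charset) == 3
--         begin, end = charset.split('-')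
--         if ord(char) in range(ord(begin), ord(end) + 1):
--             isin = True
--     else:
--         if charset[0] == '(' and charset[-1] == ")":
--             # group (...)
--             values = charset[1:-1].split('|')
--         else:  # fallback check
--             values = charset
--
--         if char in values:
--             isin = True
--
--     if complement:
--         isin = not isin
--
--     return isin
--
-- def _collapse_charsets(charsets:list[str]) -> list[str]:
--     """ Remove unecessary character sets, by removing characters which are
--         already represented by a character set.
--
--     :param charsets:
--     :type charsets: list[str]
--     :rtype: list[str]
--     """
--     out = list()
--     for i in range(len(charsets)):
--         cs = charsets[i]
--         if not(len(cs) == 1 or len(cs) == 2 and cs.startswith('\\')):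
--             # not a character
--             out.append(cs)
--
--             continue
--
--         is_contained = False
--         for j in range(len(charsets)):
--             if i == j:
--                 continue
--
--             if _inrange(charsets[j], cs[-1]):
--                 is_contained = True
--
--                 break
--
--         if not is_contained:
--             out.append(cs)
--
--     return out
-- ===== SOURCE B (Python) =====
-- def _collapse_charsets(charsets):
--     """Drop single-character entries already covered by another charset.
--
--     One pass parses every charset into either an interval (ranges) or a set of
--     covered characters (tallied in ``counts``); an entry representing character
--     ``c`` is kept iff the total number of charsets covering ``c`` (including
--     itself) is < 2."""
--     is_char = [len(cs) == 1 or (len(cs) == 2 and cs[0] == '\\') for cs in charsets]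
--     if not any(is_char):
--         return list(charsets)
--     counts = {}
--     ranges = []
--     for cs in charsets:
--         s = cs[1:-1] if cs[0] == '[' and cs[-1] == ']' else cs
--         if '-' in s:
--             lo, hi = ord(s[0]), ord(s[2])
--             if lo <= hi:
--                 ranges.append((lo, hi))
--         else:
--             if s[0] == '(' and s[-1] == ')':
--                 members = {p for p in s[1:-1].split('|') if len(p) == 1}
--             else:
--                 members = set(s)
--             for ch in members:
--                 counts[ch] = counts.get(ch, 0) + 1
--     out = []
--     for cs, flag in zip(charsets, is_char):
--         if flag:
--             ch = cs[-1]
--             x = ord(ch)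
--             total = counts.get(ch, 0) + sum(1 for lo, hi in ranges if lo <= x <= hi)
--             if total >= 2:
--                 continue
--         out.append(cs)
--     return out
-- ===== Notes on version B (the rewrite author's own statement) =====
-- stated objective: faster
-- what changed: Replaces A's per-entry rescan of all other charsets through _inrange with a single parsing pass that tallies, per character, how many charsets cover it (a dict counter plus a list of non-empty range intervals); a single-character entry is dropped iff its total cover count (itself included) is at least 2.
-- outside the precondition, e.g. on _collapse_charsets(['a', 'a', 'x-']): A returns ['x-'], B raises IndexError
import Mathlib
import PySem

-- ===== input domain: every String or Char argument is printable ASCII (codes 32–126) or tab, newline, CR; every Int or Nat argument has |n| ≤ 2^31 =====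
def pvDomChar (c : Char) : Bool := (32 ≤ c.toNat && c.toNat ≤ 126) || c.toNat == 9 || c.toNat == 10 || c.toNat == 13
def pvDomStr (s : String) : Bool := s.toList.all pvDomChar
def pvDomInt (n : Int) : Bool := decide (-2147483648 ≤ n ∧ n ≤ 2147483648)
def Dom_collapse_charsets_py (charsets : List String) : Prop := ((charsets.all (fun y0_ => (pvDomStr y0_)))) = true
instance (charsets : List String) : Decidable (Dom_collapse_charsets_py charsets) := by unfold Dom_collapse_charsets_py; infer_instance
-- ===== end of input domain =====

-- B replaces A's quadratic per-entry rescan of all other charsets by one parsing pass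
-- that tallies, for every character, how many charsets cover it (dict counter + a list
-- of non-empty range intervals); objective: faster.

-- ===== PORT A =====
/-- Port of `_inrange(charset, char, complement)`; `none` exactly where the Python raises
    (IndexError on `charset[0]`/`charset[-1]` of an empty string, failed `assert len == 3`,
    ValueError on unpacking `split('-')`, TypeError on `ord` of a non-single-char string). -/
def inrangeA (charset : String) (char : Char) (complement : Bool) : Option Bool :=
  let cs0 := charset.toList
  match PySem.List.pyGet? cs0 0, PySem.List.pyGet? cs0 (-1) with
  | some c0, some cl =>
    let cs := if c0 = '[' ∧ cl = ']' then PySem.List.slice cs0 (some 1) (some (-1)) else cs0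
    if '-' ∈ cs then
      if cs.length = 3 then
        match PySem.Chars.splitOn cs ['-'] with
        | [b, e] =>
          match b, e with
          | [bc], [ec] =>
            -- `ord(char) in range(ord(begin), ord(end) + 1)`
            let isin := decide ((bc.toNat : Int) ≤ (char.toNat : Int) ∧ (char.toNat : Int) ≤ (ec.toNat : Int))
            some (if complement then !isin else isin)
          | _, _ => none
        | _ => none
      else none
    else
      match PySem.List.pyGet? cs 0, PySem.List.pyGet? cs (-1) with
      | some d0, some dl =>
        let isin :=
          if d0 = '(' ∧ dl = ')' then
            -- group: `char in values` with values a list of strings (equality of 1-char strings)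
            (PySem.Chars.splitOn (PySem.List.slice cs (some 1) (some (-1))) ['|']).any (fun v => v = [char])
          else
            -- fallback: `char in charset` — substring test; char has length 1, so exact as membership
            PySem.Chars.isIn [char] cs
        some (if complement then !isin else isin)
      | _, _ => none
  | _, _ => none

def aIsCharTok (cs : List Char) : Bool :=
  cs.length == 1 || (cs.length == 2 && PySem.Chars.startswith cs ['\\'])

def collapse_charsets_py (charsets : List String) : List String :=
  (PySem.List.enumerate charsets 0).foldl (fun out p =>
    let cs := p.2
    if !(aIsCharTok cs.toList) then
      out ++ [cs]
    else
      let c := (PySem.List.pyGet? cs.toList (-1)).getD ' '   -- cs[-1]; cs is nonempty here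
      let isContained := (PySem.List.enumerate charsets 0).any (fun q =>
        q.1 != p.1 && ((inrangeA q.2 c false).getD false))   -- none (a raise) only outside Pre_
      if isContained then out else out ++ [cs]) []

-- ===== PORT B =====
def altOrd (c : Char) : Int := (c.toNat : Int)

def altIsChar (cs : List Char) : Bool :=
  cs.length == 1 || (cs.length == 2 && PySem.List.pyGet? cs 0 == some '\\')

def altStrip (cs : List Char) : List Char :=
  if PySem.List.pyGet? cs 0 == some '[' && PySem.List.pyGet? cs (-1) == some ']' then
    PySem.List.slice cs (some 1) (some (-1))
  else cs

def altMembers (s : List Char) : PySem.Set Char :=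
  if PySem.List.pyGet? s 0 == some '(' && PySem.List.pyGet? s (-1) == some ')' then
    PySem.Set.ofList (((PySem.Chars.splitOn (PySem.List.slice s (some 1) (some (-1))) ['|']).filter
      (fun p => p.length == 1)).map (fun p => p.headD ' '))
  else
    PySem.Set.ofList s

/-- One pass over the charsets: a counter of covered characters plus the non-empty range intervals. -/
def altParse (charsets : List String) : PySem.Dict Char Int × List (Int × Int) :=
  charsets.foldl (fun acc cs =>
    let s := altStrip cs.toList
    if '-' ∈ s then
      let lo := altOrd ((PySem.List.pyGet? s 0).getD ' ')
      let hi := altOrd ((PySem.List.pyGet? s 2).getD ' ')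
      (acc.1, if lo ≤ hi then acc.2 ++ [(lo, hi)] else acc.2)
    else
      ((altMembers s).foldl (fun d ch => d.modify ch 0 (· + 1)) acc.1, acc.2))
    (PySem.Dict.empty, [])

def collapse_charsets_py_alt (charsets : List String) : List String :=
  let isChar := charsets.map (fun cs => altIsChar cs.toList)
  if !(isChar.any id) then charsets
  else
    let parsed := altParse charsets
    (charsets.zip isChar).foldl (fun out q =>
      if q.2 then
        let c := (PySem.List.pyGet? q.1.toList (-1)).getD ' '
        let x := altOrd c
        let total := parsed.1.getD c 0 +
          (parsed.2.map (fun r => if r.1 ≤ x ∧ x ≤ r.2 then (1 : Int) else 0)).sum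
        if 2 ≤ total then out else out ++ [q.1]
      else out ++ [q.1]) []

-- ===== PRECONDITION & SPEC =====
def pvStripPre (cs : List Char) : List Char :=
  if cs.head? = some '[' ∧ cs.getLast? = some ']' then (cs.drop 1).dropLast else cs

/-- A charset `_inrange` can be called on without raising: nonempty, bracket-stripped body
    nonempty, and a `-` only as the middle of a proper three-character range `x-y`. -/
def pvWellformed (cs : List Char) : Bool :=
  !cs.isEmpty && !(pvStripPre cs).isEmpty &&
    (!(decide ('-' ∈ pvStripPre cs)) ||
      ((pvStripPre cs).length == 3 && (pvStripPre cs)[0]? != some '-' &&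
        (pvStripPre cs)[1]? == some '-' && (pvStripPre cs)[2]? != some '-'))

/-- A single-character entry (`c` or `\c`), on which A runs the inner containment scan. -/
def pvIsCharEntry (cs : List Char) : Bool :=
  cs.length == 1 || (cs.length == 2 && cs[0]? == some '\\')

-- Pre_ excludes exactly the inputs on which A's inner `_inrange` scan can raise (IndexError /
-- AssertionError / ValueError / TypeError on an empty or malformed `x-y` charset): when a
-- single-character entry is present, every charset must be well-formed.  (On some such inputs A
-- still returns, when every inner scan happens to break before reaching the malformed charset.)
def Pre_collapse_charsets_py (charsets : List String) : Prop :=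
  (charsets.any (fun cs => pvIsCharEntry cs.toList) = true) →
    (charsets.all (fun cs => pvWellformed cs.toList) = true)
instance (charsets : List String) : Decidable (Pre_collapse_charsets_py charsets) := by
  unfold Pre_collapse_charsets_py; infer_instance

def pvWitness_collapse_charsets_py : List String := ["a", "[a-z]", "xyz"]

def Spec_collapse_charsets_py (charsets : List String) (out : List String) : Prop := out = collapse_charsets_py_alt charsets
instance (charsets : List String) (out : List String) : Decidable (Spec_collapse_charsets_py charsets out) := by unfold Spec_collapse_charsets_py; infer_instance

-- ===== CLAIM (what is proved, stated in full; the proofs are below) =====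
def Claim_equal_collapse_charsets_py : Prop := ∀ (charsets : List String), Dom_collapse_charsets_py charsets → Pre_collapse_charsets_py charsets → Spec_collapse_charsets_py charsets (collapse_charsets_py charsets)


-- ===== LEMMAS AND PROOFS =====

theorem pyGet?_zero {α : Type} (l : List α) : PySem.List.pyGet? l 0 = l.head? := by
  rw [show (0:Int) = ((0:Nat):Int) from rfl, PySem.List.pyGet?_natCast]
  exact List.head?_eq_getElem?.symm

theorem slice_one_neg_one {α : Type} (l : List α) :
    PySem.List.slice l (some 1) (some (-1)) = (l.drop 1).dropLast := by
  cases l with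
  | nil => rfl
  | cons x t =>
    have hnn : ¬((t.length : Int) < 0) := by omega
    simp [PySem.List.slice, PySem.List.clampIdx, List.dropLast_eq_take, hnn]

theorem splitOn_range (a b : Char) (ha : a ≠ '-') (hb : b ≠ '-') :
    PySem.Chars.splitOn [a, '-', b] ['-'] = [[a], [b]] := by
  simp [PySem.Chars.splitOn, PySem.Chars.splitOn.go, Ne.symm ha, Ne.symm hb]

theorem altStrip_eq (l : List Char) : altStrip l = pvStripPre l := by
  unfold altStrip pvStripPre
  rw [pyGet?_zero, PySem.List.pyGet?_neg_one, slice_one_neg_one]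
  split_ifs with h1 h2 h2 <;> simp_all

theorem isCharTok_eq (l : List Char) : aIsCharTok l = pvIsCharEntry l := by
  unfold aIsCharTok pvIsCharEntry
  match l with
  | [] => rfl
  | [a] => rfl
  | a :: b :: t =>
    have : PySem.Chars.startswith (a :: b :: t) ['\\'] = (a == '\\') := by
      apply Bool.eq_iff_iff.mpr
      rw [PySem.Chars.startswith_iff]
      simp only [List.cons_prefix_cons, List.nil_prefix, and_true, beq_iff_eq]
      exact eq_comm
    simp [this]

theorem altIsChar_eq (l : List Char) : altIsChar l = pvIsCharEntry l := by
  unfold altIsChar pvIsCharEntry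
  rw [pyGet?_zero, List.head?_eq_getElem?]

/-- The characters a charset covers (B\'s parse of it), as the reference predicate. -/
def pvContains (cs : List Char) (c : Char) : Bool :=
  let t := pvStripPre cs
  if '-' ∈ t then
    decide (altOrd (t.headD ' ') ≤ altOrd c ∧ altOrd c ≤ altOrd (t[2]?.getD ' '))
  else
    decide (c ∈ altMembers t)

def pvCovers (charsets : List String) (c : Char) : Nat :=
  charsets.countP (fun cs => pvContains cs.toList c)

def pvKeep (charsets : List String) (cs : String) : Bool :=
  !(pvIsCharEntry cs.toList) ||
    decide (pvCovers charsets ((PySem.List.pyGet? cs.toList (-1)).getD ' ') < 2)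

theorem wf_shape (l : List Char) (h : pvWellformed l = true) (hm : '-' ∈ pvStripPre l) :
    ∃ a b, pvStripPre l = [a, '-', b] ∧ a ≠ '-' ∧ b ≠ '-' := by
  simp only [pvWellformed, Bool.and_eq_true, Bool.or_eq_true] at h
  obtain ⟨⟨-, -⟩, h3⟩ := h
  rcases h3 with h3 | h3
  · exact absurd h3 (by simp [hm])
  · obtain ⟨⟨⟨hlen, h0⟩, h1⟩, h2⟩ := h3
    rw [beq_iff_eq] at hlen
    obtain ⟨a, m, b, hab⟩ := List.length_eq_three.mp hlen
    rw [hab] at h0 h1 h2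
    simp at h0 h1 h2
    exact ⟨a, b, by rw [hab, h1], h0, h2⟩

theorem strip_nonempty (l : List Char) (h : pvWellformed l = true) :
    l ≠ [] ∧ pvStripPre l ≠ [] := by
  simp only [pvWellformed, Bool.and_eq_true] at h
  obtain ⟨⟨h1, h2⟩, -⟩ := h
  simp only [Bool.not_eq_true', List.isEmpty_eq_false_iff] at h1 h2
  exact ⟨h1, h2⟩

theorem group_mem (parts : List (List Char)) (c : Char) :
    parts.any (fun v => v = [c]) =
      decide (c ∈ PySem.Set.ofList ((parts.filter (fun p => p.length == 1)).map (fun p => p.headD ' '))) := by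
  apply Bool.eq_iff_iff.mpr
  simp only [List.any_eq_true, decide_eq_true_eq, PySem.Set.mem_ofList, List.mem_map,
    List.mem_filter]
  constructor
  · rintro ⟨v, hv, hvc⟩
    subst hvc
    exact ⟨[c], ⟨hv, by simp⟩, rfl⟩
  · rintro ⟨p, ⟨hp, hl⟩, hh⟩
    match p, hl with
    | [x], _ =>
      simp at hh
      subst hh
      exact ⟨[x], hp, by simp⟩

/-- On a well-formed charset, A\'s `_inrange` returns exactly the reference predicate. -/
theorem inrangeA_eq (cs : String) (c : Char) (h : pvWellformed cs.toList = true) :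
    inrangeA cs c false = some (pvContains cs.toList c) := by
  obtain ⟨hne, htne⟩ := strip_nonempty cs.toList h
  obtain ⟨c0, h0⟩ := Option.ne_none_iff_exists'.mp
    (show cs.toList.head? ≠ none by simpa [List.head?_eq_none_iff] using hne)
  obtain ⟨cl, h1⟩ := Option.ne_none_iff_exists'.mp
    (show cs.toList.getLast? ≠ none by simpa [List.getLast?_eq_none_iff] using hne)
  have hstrip : (if c0 = '[' ∧ cl = ']' then (cs.toList.drop 1).dropLast else cs.toList) = pvStripPre cs.toList := by
    unfold pvStripPre
    rw [h0, h1]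
    split_ifs with hx hy hy <;> simp_all
  by_cases hm : '-' ∈ pvStripPre cs.toList
  · obtain ⟨a, b, hshape, ha, hb⟩ := wf_shape cs.toList h hm
    simp only [inrangeA, pyGet?_zero, PySem.List.pyGet?_neg_one, h0, h1, slice_one_neg_one,
      hstrip, hshape, splitOn_range a b ha hb, pvContains]
    simp [altOrd]
  · obtain ⟨d0, hd0⟩ := Option.ne_none_iff_exists'.mp
      (show (pvStripPre cs.toList).head? ≠ none by simpa [List.head?_eq_none_iff] using htne)
    obtain ⟨dl, hdl⟩ := Option.ne_none_iff_exists'.mp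
      (show (pvStripPre cs.toList).getLast? ≠ none by simpa [List.getLast?_eq_none_iff] using htne)
    simp only [inrangeA, pyGet?_zero, PySem.List.pyGet?_neg_one, h0, h1, slice_one_neg_one,
      hstrip, if_neg hm, hd0, hdl, pvContains, altMembers]
    simp only [Bool.false_eq_true, if_false]
    by_cases hg : d0 = '(' ∧ dl = ')'
    · rw [if_pos hg, if_pos (by simp [hg.1, hg.2])]
      congr 1
      exact group_mem _ c
    · rw [if_neg hg, if_neg (by simp only [Bool.and_eq_true, beq_iff_eq, Option.some.injEq]; tauto)]
      congr 1
      apply Bool.eq_iff_iff.mpr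
      rw [PySem.Chars.isIn_iff_infix, List.singleton_infix_iff]
      simp [PySem.Set.mem_ofList]

theorem self_contained_list (l : List Char) (hc : pvIsCharEntry l = true)
    (h : pvWellformed l = true) :
    pvContains l (l.getLast?.getD ' ') = true := by
  simp only [pvIsCharEntry, Bool.or_eq_true, Bool.and_eq_true, beq_iff_eq] at hc
  have hnostrip : ∀ (x : Char) (t : List Char), x ≠ '[' → pvStripPre (x :: t) = x :: t := by
    intro x t hx
    unfold pvStripPre
    rw [if_neg]
    rintro ⟨hh, -⟩
    simp at hh
    exact hx hh
  rcases hc with hc | ⟨hc2, hc0⟩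
  · obtain ⟨a, rfl⟩ := List.length_eq_one_iff.mp (by simpa using hc)
    have hstrip : pvStripPre [a] = [a] := by
      unfold pvStripPre
      split_ifs with hco
      · exfalso
        simp at hco
        exact absurd (hco.1.symm.trans hco.2) (by decide)
      · rfl
    have hnm : ¬ ('-' ∈ pvStripPre [a]) := by
      rw [hstrip]
      intro hmem
      obtain ⟨x, y, hsh, -, -⟩ := wf_shape [a] h (by rw [hstrip]; exact hmem)
      rw [hstrip] at hsh
      simp at hsh
    have hmembers : altMembers (pvStripPre [a]) = PySem.Set.ofList [a] := by
      rw [hstrip]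
      unfold altMembers
      rw [if_neg]
      rw [pyGet?_zero, PySem.List.pyGet?_neg_one]
      simp only [Bool.and_eq_true, beq_iff_eq, Option.some.injEq, List.head?_cons, List.getLast?_singleton]
      rintro ⟨h1, h2⟩
      exact absurd (h1.symm.trans h2) (by decide)
    simp [pvContains, hnm, hmembers, PySem.Set.mem_ofList]
  · obtain ⟨x, y, rfl⟩ := List.length_eq_two.mp (by simpa using hc2)
    have hx : x = '\\' := by simpa using hc0
    subst hx
    have hstrip : pvStripPre ('\\' :: [y]) = '\\' :: [y] := hnostrip _ _ (by decide)
    have hnm : ¬ ('-' ∈ pvStripPre ['\\', y]) := by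
      rw [hstrip]
      intro hmem
      obtain ⟨u, v, hsh, -, -⟩ := wf_shape ['\\', y] h (by rw [hstrip]; exact hmem)
      rw [hstrip] at hsh
      simp at hsh
    have hmembers : altMembers (pvStripPre ['\\', y]) = PySem.Set.ofList ['\\', y] := by
      rw [hstrip]
      unfold altMembers
      rw [if_neg]
      rw [pyGet?_zero]
      simp only [Bool.and_eq_true, beq_iff_eq, Option.some.injEq, List.head?_cons]
      rintro ⟨h1, -⟩
      exact absurd h1 (by decide)
    simp [pvContains, hnm, hmembers, PySem.Set.mem_ofList]

theorem self_contained (cs : String) (hc : pvIsCharEntry cs.toList = true)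
    (h : pvWellformed cs.toList = true) :
    pvContains cs.toList ((PySem.List.pyGet? cs.toList (-1)).getD ' ') = true := by
  rw [PySem.List.pyGet?_neg_one]
  exact self_contained_list cs.toList hc h

theorem countP_two_le_iff {α : Type} (p : α → Bool) (l : List α) (i : Nat) (hi : i < l.length)
    (hp : p l[i] = true) :
    (2 ≤ l.countP p) ↔ ∃ j, ∃ hj : j < l.length, j ≠ i ∧ p l[j] = true := by
  induction l generalizing i with
  | nil => simp at hi
  | cons a t ih =>
    cases i with
    | zero =>
      simp only [List.getElem_cons_zero] at hp
      rw [List.countP_cons, hp, if_pos rfl]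
      constructor
      · intro h2
        have h1 : 0 < t.countP p := by omega
        rw [List.countP_pos_iff] at h1
        obtain ⟨x, hx, hpx⟩ := h1
        obtain ⟨k, hk, rfl⟩ := List.mem_iff_getElem.mp hx
        exact ⟨k+1, by simpa using hk, by simp, by simpa using hpx⟩
      · rintro ⟨j, hj, hne, hpj⟩
        cases j with
        | zero => exact absurd rfl hne
        | succ k =>
          have hk : k < t.length := by simpa using hj
          have hpk : p t[k] = true := by simpa using hpj
          have : 0 < t.countP p := List.countP_pos_iff.mpr ⟨t[k], List.getElem_mem hk, hpk⟩
          omega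
    | succ k =>
      have hk : k < t.length := by simpa using hi
      have hpk : p t[k] = true := by simpa using hp
      rw [List.countP_cons]
      cases hpa : p a
      · rw [if_neg (by simp), Nat.add_zero, ih k hk hpk]
        constructor
        · rintro ⟨j, hj, hne, hpj⟩
          exact ⟨j+1, by simpa using hj, by omega, by simpa using hpj⟩
        · rintro ⟨j, hj, hne, hpj⟩
          cases j with
          | zero =>
            simp only [List.getElem_cons_zero] at hpj
            rw [hpa] at hpj
            exact absurd hpj (by simp)
          | succ m =>
            exact ⟨m, by simpa using hj, by omega, by simpa using hpj⟩
      · have hcp : 0 < t.countP p := List.countP_pos_iff.mpr ⟨t[k], List.getElem_mem hk, hpk⟩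
        rw [if_pos rfl]
        constructor
        · intro _
          exact ⟨0, by simp, by omega, by simpa using hpa⟩
        · intro _
          omega

theorem countP_disjoint_add {α : Type} (p q : α → Bool) (l : List α)
    (h : ∀ a ∈ l, ¬(p a = true ∧ q a = true)) :
    l.countP p + l.countP q = l.countP (fun a => p a || q a) := by
  induction l with
  | nil => rfl
  | cons a t ih =>
    have ht := ih (fun x hx => h x (List.mem_cons_of_mem a hx))
    have ha := h a (List.mem_cons_self)
    simp only [List.countP_cons]
    cases hp : p a <;> cases hq : q a <;> simp_all <;> omega

-- proof-layer views of B\'s single parsing loop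
def pvS (cs : String) : List Char := altStrip cs.toList
def pvLo (cs : String) : Int := altOrd ((PySem.List.pyGet? (pvS cs) 0).getD ' ')
def pvHi (cs : String) : Int := altOrd ((PySem.List.pyGet? (pvS cs) 2).getD ' ')
def dictStep (d : PySem.Dict Char Int) (cs : String) : PySem.Dict Char Int :=
  if '-' ∈ pvS cs then d
  else (altMembers (pvS cs)).foldl (fun d ch => d.modify ch 0 (· + 1)) d
def rangeStep (r : List (Int × Int)) (cs : String) : List (Int × Int) :=
  if '-' ∈ pvS cs then (if pvLo cs ≤ pvHi cs then r ++ [(pvLo cs, pvHi cs)] else r) else r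

theorem altParse_eq (charsets : List String) :
    altParse charsets = (charsets.foldl dictStep PySem.Dict.empty, charsets.foldl rangeStep []) := by
  unfold altParse
  trans (charsets.foldl (fun (acc : PySem.Dict Char Int × List (Int × Int)) cs =>
      (dictStep acc.1 cs, rangeStep acc.2 cs)) (PySem.Dict.empty, []))
  · apply PySem.List.foldl_congr_mem
    intro acc cs _
    unfold dictStep rangeStep pvLo pvHi pvS
    dsimp only
    split_ifs <;> rfl
  · exact PySem.List.foldl_prod_mk _ _ _ _ _

theorem dict_count (l : List String) (d : PySem.Dict Char Int) (c : Char) :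
    (l.foldl dictStep d).getD c 0 =
      d.getD c 0 + (l.countP (fun cs => !decide ('-' ∈ pvS cs) && decide (c ∈ altMembers (pvS cs))) : Int) := by
  induction l generalizing d with
  | nil => simp
  | cons cs t ih =>
    rw [List.foldl_cons, ih, List.countP_cons]
    unfold dictStep
    by_cases hm : '-' ∈ pvS cs
    · simp [hm]
    · rw [if_neg hm, PySem.Dict.getD_foldl_modify_add_one]
      have hnd : (altMembers (pvS cs)).Nodup := by
        unfold altMembers
        split_ifs <;> exact PySem.Set.nodup_ofList _
      rw [hnd.count]
      by_cases hc : c ∈ altMembers (pvS cs) <;> simp [hm, hc] <;> omega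

theorem range_list (l : List String) :
    l.foldl rangeStep [] =
      (l.filter (fun cs => decide ('-' ∈ pvS cs ∧ pvLo cs ≤ pvHi cs))).map (fun cs => (pvLo cs, pvHi cs)) := by
  have hstep : rangeStep = fun r cs =>
      if ('-' ∈ pvS cs ∧ pvLo cs ≤ pvHi cs) then r ++ [(pvLo cs, pvHi cs)] else r := by
    funext r cs
    unfold rangeStep
    split_ifs <;> simp_all
  rw [hstep, PySem.List.foldl_append_ite, List.nil_append]

theorem pointwise_cover (cs : String) (h : pvWellformed cs.toList = true) (c : Char) :
    ((!decide ('-' ∈ pvS cs) && decide (c ∈ altMembers (pvS cs))) ||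
      ((decide (pvLo cs ≤ altOrd c ∧ altOrd c ≤ pvHi cs)) && decide ('-' ∈ pvS cs ∧ pvLo cs ≤ pvHi cs)))
      = pvContains cs.toList c := by
  have hs : pvS cs = pvStripPre cs.toList := altStrip_eq _
  by_cases hm : '-' ∈ pvStripPre cs.toList
  · obtain ⟨a, b, hshape, -, -⟩ := wf_shape cs.toList h hm
    have hm3 : ('-':Char) ∈ [a, '-', b] := by simp
    have hlo : pvLo cs = altOrd a := by
      unfold pvLo
      rw [hs, hshape, pyGet?_zero]
      rfl
    have hhi : pvHi cs = altOrd b := by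
      unfold pvHi
      rw [hs, hshape, show ((2:Int)) = ((2:Nat):Int) from rfl, PySem.List.pyGet?_natCast]
      rfl
    simp only [pvContains, hs, hshape]
    rw [if_pos hm3]
    simp only [hlo, hhi, List.headD_cons, List.getElem?_cons_succ, List.getElem?_cons_zero,
      Option.getD_some]
    apply Bool.eq_iff_iff.mpr
    simp only [Bool.or_eq_true, Bool.and_eq_true, Bool.not_eq_true', decide_eq_false_iff_not,
      decide_eq_true_eq]
    constructor
    · rintro (⟨hno, -⟩ | ⟨hin, -⟩)
      · exact absurd hm3 hno
      · exact hin
    · rintro ⟨h1, h2⟩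
      exact Or.inr ⟨⟨h1, h2⟩, hm3, by omega⟩
  · simp [pvContains, hs, hm]

/-- The central counting fact: B\'s dict total plus interval hits equals the number of
    covering charsets. -/
theorem altParse_covers (charsets : List String)
    (hw : ∀ cs ∈ charsets, pvWellformed cs.toList = true) (c : Char) :
    (altParse charsets).1.getD c 0 +
      ((altParse charsets).2.map (fun r => if r.1 ≤ altOrd c ∧ altOrd c ≤ r.2 then (1 : Int) else 0)).sum
      = (pvCovers charsets c : Int) := by
  rw [altParse_eq]
  dsimp only
  rw [dict_count, range_list, PySem.Dict.getD_empty, List.map_map]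
  have hcomp : ((fun r : Int × Int => if r.1 ≤ altOrd c ∧ altOrd c ≤ r.2 then (1:Int) else 0) ∘
      (fun cs => (pvLo cs, pvHi cs)))
      = fun cs => if (decide (pvLo cs ≤ altOrd c ∧ altOrd c ≤ pvHi cs)) = true then (1:Int) else 0 := by
    funext cs
    simp
  rw [hcomp, PySem.List.sum_map_ite_one_zero, List.countP_filter, zero_add]
  rw [show (charsets.countP (fun cs => !decide ('-' ∈ pvS cs) && decide (c ∈ altMembers (pvS cs)))
        + charsets.countP (fun cs => decide (pvLo cs ≤ altOrd c ∧ altOrd c ≤ pvHi cs) &&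
            decide ('-' ∈ pvS cs ∧ pvLo cs ≤ pvHi cs)) : Int)
      = ((charsets.countP (fun cs => !decide ('-' ∈ pvS cs) && decide (c ∈ altMembers (pvS cs)))
        + charsets.countP (fun cs => decide (pvLo cs ≤ altOrd c ∧ altOrd c ≤ pvHi cs) &&
            decide ('-' ∈ pvS cs ∧ pvLo cs ≤ pvHi cs)) : Nat) : Int) from by push_cast; ring]
  rw [countP_disjoint_add _ _ _ (by
    rintro cs _ ⟨h1, h2⟩
    simp only [Bool.and_eq_true, Bool.not_eq_true', decide_eq_false_iff_not, decide_eq_true_eq] at h1 h2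
    exact h1.1 h2.2.1)]
  unfold pvCovers
  congr 1
  apply List.countP_congr
  intro cs hcs
  rw [pointwise_cover cs (hw cs hcs) c]

theorem zip_self_map {α β : Type} (l : List α) (f : α → β) :
    l.zip (l.map f) = l.map (fun x => (x, f x)) := by
  induction l with
  | nil => rfl
  | cons a t ih => simp [ih]

theorem portA_filter (charsets : List String) (hPre : Pre_collapse_charsets_py charsets) :
    collapse_charsets_py charsets = charsets.filter (pvKeep charsets) := by
  unfold collapse_charsets_py
  trans ((PySem.List.enumerate charsets 0).foldl (fun out (p : Int × String) =>
      if pvKeep charsets p.2 then out ++ [p.2] else out) [])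
  · apply PySem.List.foldl_congr_mem
    intro out p hp
    obtain ⟨k, hk, rfl⟩ := (PySem.List.mem_enumerate_iff _ _ _).mp hp
    dsimp only
    by_cases hA : aIsCharTok (charsets[k]).toList = true
    case neg =>
      rw [Bool.not_eq_true] at hA
      simp [hA, pvKeep, ← isCharTok_eq]
    case pos =>
      have hEntry : pvIsCharEntry (charsets[k]).toList = true := by
        rw [← isCharTok_eq]; exact hA
      have hex : charsets.any (fun cs => pvIsCharEntry cs.toList) = true :=
        List.any_eq_true.mpr ⟨charsets[k], List.getElem_mem hk, hEntry⟩
      have hwf : ∀ cs ∈ charsets, pvWellformed cs.toList = true := by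
        simpa [List.all_eq_true] using hPre hex
      rw [hA]
      simp only [Bool.not_true, Bool.false_eq_true, if_false]
      have hrw : ((PySem.List.enumerate charsets 0).any (fun q =>
          q.1 != (0 + (k:Int)) &&
            ((inrangeA q.2 ((PySem.List.pyGet? (charsets[k]).toList (-1)).getD ' ') false).getD false)))
          = decide (2 ≤ pvCovers charsets ((PySem.List.pyGet? (charsets[k]).toList (-1)).getD ' ')) := by
        rw [PySem.List.any_congr_mem (g := fun q : Int × String =>
          q.1 != (0 + (k:Int)) &&
            pvContains q.2.toList ((PySem.List.pyGet? (charsets[k]).toList (-1)).getD ' ')) (by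
          intro q hq
          obtain ⟨j, hj, rfl⟩ := (PySem.List.mem_enumerate_iff _ _ _).mp hq
          rw [inrangeA_eq _ _ (hwf _ (List.getElem_mem hj))]
          rfl)]
        apply Bool.eq_iff_iff.mpr
        rw [List.any_eq_true, decide_eq_true_eq]
        constructor
        · rintro ⟨q, hq, hql⟩
          obtain ⟨j, hj, rfl⟩ := (PySem.List.mem_enumerate_iff _ _ _).mp hq
          simp only [Bool.and_eq_true, bne_iff_ne] at hql
          refine (countP_two_le_iff _ charsets k hk
            (self_contained _ hEntry (hwf _ (List.getElem_mem hk)))).mpr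
            ⟨j, hj, ?_, hql.2⟩
          intro hjk
          exact hql.1 (by rw [hjk])
        · intro h2
          obtain ⟨j, hj, hne, hpj⟩ := (countP_two_le_iff _ charsets k hk
            (self_contained _ hEntry (hwf _ (List.getElem_mem hk)))).mp h2
          refine ⟨(0 + (j:Int), charsets[j]), (PySem.List.mem_enumerate_iff _ _ _).mpr ⟨j, hj, rfl⟩, ?_⟩
          simp only [Bool.and_eq_true, bne_iff_ne]
          refine ⟨?_, hpj⟩
          intro hcontra
          apply hne
          omega
      rw [hrw]
      by_cases h2 : 2 ≤ pvCovers charsets ((PySem.List.pyGet? (charsets[k]).toList (-1)).getD ' ')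
      · simp [h2, pvKeep, hEntry, Nat.not_lt.mpr h2]
      · simp [h2, pvKeep, hEntry, Nat.lt_of_not_le h2]
  · rw [PySem.List.foldl_append_if (p := fun q : Int × String => pvKeep charsets q.2)
      (f := fun q : Int × String => q.2), List.nil_append]
    rw [show ((PySem.List.enumerate charsets 0).filter (fun q => pvKeep charsets q.2))
        = ((PySem.List.enumerate charsets 0).filter ((fun s => pvKeep charsets s) ∘ (fun q : Int × String => q.2))) from rfl]
    rw [← List.filter_map, PySem.List.map_snd_enumerate]

theorem portB_filter (charsets : List String) (hPre : Pre_collapse_charsets_py charsets) :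
    collapse_charsets_py_alt charsets = charsets.filter (pvKeep charsets) := by
  unfold collapse_charsets_py_alt
  dsimp only
  by_cases hAny : (charsets.map (fun cs => altIsChar cs.toList)).any id = true
  case neg =>
    rw [Bool.not_eq_true] at hAny
    rw [hAny]
    simp only [Bool.not_false, if_true]
    symm
    apply List.filter_eq_self.mpr
    intro cs hcs
    have hficc : altIsChar cs.toList = false := by
      by_contra hcc
      rw [Bool.not_eq_false] at hcc
      have : (charsets.map (fun cs => altIsChar cs.toList)).any id = true :=
        List.any_eq_true.mpr ⟨true, List.mem_map.mpr ⟨cs, hcs, hcc⟩, rfl⟩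
      rw [hAny] at this
      exact Bool.false_ne_true this
    simp [pvKeep, ← altIsChar_eq, hficc]
  case pos =>
    rw [hAny]
    simp only [Bool.not_true, Bool.false_eq_true, if_false]
    have hex : charsets.any (fun cs => pvIsCharEntry cs.toList) = true := by
      rw [List.any_eq_true] at hAny ⊢
      obtain ⟨b, hbm, hb⟩ := hAny
      obtain ⟨cs, hcs, rfl⟩ := List.mem_map.mp hbm
      exact ⟨cs, hcs, by rw [← altIsChar_eq]; exact hb⟩
    have hwf : ∀ cs ∈ charsets, pvWellformed cs.toList = true := by
      simpa [List.all_eq_true] using hPre hex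
    rw [zip_self_map, List.foldl_map]
    trans (charsets.foldl (fun out cs => if pvKeep charsets cs then out ++ [cs] else out) [])
    · apply PySem.List.foldl_congr_mem
      intro acc cs hcs
      dsimp only
      by_cases hA : altIsChar cs.toList = true
      · rw [hA]
        simp only [if_true]
        rw [altParse_covers charsets hwf ((PySem.List.pyGet? cs.toList (-1)).getD ' ')]
        have hEntry : pvIsCharEntry cs.toList = true := by rw [← altIsChar_eq]; exact hA
        by_cases h2 : 2 ≤ pvCovers charsets ((PySem.List.pyGet? cs.toList (-1)).getD ' ')
        · rw [if_pos (by exact_mod_cast h2)]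
          simp [pvKeep, hEntry, Nat.not_lt.mpr h2]
        · rw [if_neg (by intro hcon; exact h2 (by exact_mod_cast hcon))]
          simp only [pvKeep, hEntry, Bool.not_true, Bool.false_or]
          rw [if_pos (by simp only [decide_eq_true_eq]; omega)]
      · rw [Bool.not_eq_true] at hA
        rw [hA]
        simp only [Bool.false_eq_true, if_false]
        have hEntry : pvIsCharEntry cs.toList = false := by rw [← altIsChar_eq]; exact hA
        simp [pvKeep, hEntry]
    · rw [PySem.List.foldl_append_if (p := fun cs => pvKeep charsets cs) (f := fun cs : String => cs),
        List.nil_append]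
      simp

-- ===== VERDICT (by name: the statement is the Claim_ definition above) =====
theorem collapse_charsets_py_spec : Claim_equal_collapse_charsets_py := by
  intro charsets _ hPre
  unfold Spec_collapse_charsets_py
  rw [portA_filter charsets hPre, portB_filter charsets hPre]
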